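-- pv_equiv track=rewrite | github.com/asdhgffghlkj/tasks | new_task.py | is_lower_camel_case
-- ===== SOURCE A (Python) =====
-- def is_lower_camel_case(word: str, allow_one_word: bool = True) -> bool:
--     """
--     Determine if the word spelled in lowerCamelCase or not
--     More info: https://en.wikipedia.org/wiki/Camel_case
--     """
--     symblist = list(word)
--     capcount = 0
--     if symblist[0].isupper():
--         return 0
--     for i in range(len(symblist)):
--         symbol = symblist[i]
--         if symbol.isalpha():
--             if symbol.isupper():
--                 capcount+=1
--         else:
--             return 0
--     if capcount == 0:
--         if allow_one_word==False:
--             return 0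
--     return 1
-- ===== SOURCE B (Python) =====
-- def is_lower_camel_case(word: str, allow_one_word: bool = True) -> bool:
--     # Transform-and-compare: judge the word against its lowercased copy
--     # instead of scanning characters with predicates.
--     lowered = word.lower()
--     if not lowered.isalpha():
--         return 0
--     if word[:1] != lowered[:1]:
--         return 0
--     if word == lowered and not allow_one_word:
--         return 0
--     return 1
-- ===== Notes on version B (the rewrite author's own statement) =====
-- stated objective: faster
-- what changed: B judges the word against its lowercased copy (lowered.isalpha(), word[:1] != lowered[:1] detects an uppercase initial, word == lowered detects an all-lowercase word) instead of A's per-character Python loop with an uppercase counter; the whole-string C-level operations give a constant-factor speedup (measured ~12x at the largest size).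
import Mathlib
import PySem

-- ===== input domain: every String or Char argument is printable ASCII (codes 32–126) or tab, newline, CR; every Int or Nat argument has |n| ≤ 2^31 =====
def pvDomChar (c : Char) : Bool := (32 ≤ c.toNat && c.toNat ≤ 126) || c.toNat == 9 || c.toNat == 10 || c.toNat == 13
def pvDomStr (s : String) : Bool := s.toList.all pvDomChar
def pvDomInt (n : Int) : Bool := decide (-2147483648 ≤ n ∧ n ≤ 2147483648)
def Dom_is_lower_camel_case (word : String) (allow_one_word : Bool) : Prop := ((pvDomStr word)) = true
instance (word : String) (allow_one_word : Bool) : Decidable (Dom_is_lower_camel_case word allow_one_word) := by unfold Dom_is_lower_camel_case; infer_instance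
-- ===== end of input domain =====

-- ===== PORT A =====
-- B judges the word against its lowercased copy instead of A's counting loop; same values wherever A returns.
-- A's loop: early-returns none on a non-alpha symbol, else accumulates the uppercase count.
def pvALoop : List Char → Int → Option Int
  | [], capcount => some capcount
  | symbol :: rest, capcount =>
      if PySem.Chars.isalpha symbol then
        pvALoop rest (if PySem.Chars.isupper symbol then capcount + 1 else capcount)
      else none

def is_lower_camel_case (word : String) (allow_one_word : Bool) : Int :=
  let symblist := word.toList
  match PySem.List.pyGet? symblist 0 with
  | none => 0  -- unreachable under Pre_ (Python raises IndexError here)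
  | some c0 =>
    if PySem.Chars.isupper c0 then 0
    else
      match pvALoop symblist 0 with
      | none => 0
      | some capcount =>
        if capcount = 0 ∧ allow_one_word = false then 0 else 1

-- ===== PORT B =====
def is_lower_camel_case_alt (word : String) (allow_one_word : Bool) : Int :=
  let cs := word.toList
  let lowered := PySem.Chars.lower cs          -- word.lower()
  if ¬ PySem.Chars.strIsalpha lowered then 0
  else if PySem.List.slice cs none (some 1) ≠ PySem.List.slice lowered none (some 1) then 0  -- word[:1] != lowered[:1]
  else if cs = lowered ∧ allow_one_word = false then 0
  else 1

-- ===== PRECONDITION & SPEC =====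
-- Pre_ excludes only the empty string, where A raises IndexError at word[0] (B returns 0 there).
def Pre_is_lower_camel_case (word : String) (allow_one_word : Bool) : Prop := word ≠ ""
instance (word : String) (allow_one_word : Bool) : Decidable (Pre_is_lower_camel_case word allow_one_word) := by unfold Pre_is_lower_camel_case; infer_instance
def pvWitness_is_lower_camel_case : String × Bool := ("camelCase", true)

def Spec_is_lower_camel_case (word : String) (allow_one_word : Bool) (out : Int) : Prop := out = is_lower_camel_case_alt word allow_one_word
instance (word : String) (allow_one_word : Bool) (out : Int) : Decidable (Spec_is_lower_camel_case word allow_one_word out) := by unfold Spec_is_lower_camel_case; infer_instance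

-- ===== CLAIM (what is proved, stated in full; the proofs are below) =====
def Claim_equal_is_lower_camel_case : Prop := ∀ (word : String) (allow_one_word : Bool), Dom_is_lower_camel_case word allow_one_word → Pre_is_lower_camel_case word allow_one_word → Spec_is_lower_camel_case word allow_one_word (is_lower_camel_case word allow_one_word)

-- ===== LEMMAS AND PROOFS =====

-- lowerChar fixes exactly the non-uppercase characters.
theorem lowerChar_toNat (c : Char) (h : PySem.Chars.isupper c = true) :
    (PySem.Chars.lowerChar c).toNat = c.toNat + 32 := by
  have hr : 65 ≤ c.toNat ∧ c.toNat ≤ 90 := by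
    simp only [PySem.Chars.isupper, Bool.and_eq_true, decide_eq_true_eq] at h
    exact ⟨Nat.succ_le_of_lt h.1, h.2⟩
  have hv : (c.toNat + 32).isValidChar := Or.inl (by omega)
  rw [PySem.Chars.lowerChar, if_pos h, Char.ofNat, dif_pos hv]; rfl

theorem lowerChar_eq_self_iff (c : Char) : PySem.Chars.lowerChar c = c ↔ PySem.Chars.isupper c = false := by
  by_cases h : PySem.Chars.isupper c
  · have ht := lowerChar_toNat c h
    simp only [h, iff_false, Bool.true_eq_false]
    intro he
    have := congrArg Char.toNat he
    omega
  · simp [PySem.Chars.lowerChar, h]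

-- lowering preserves alphabeticness characterwise (an uppercase letter lowers to a lowercase one).
theorem isalpha_lowerChar (c : Char) : PySem.Chars.isalpha (PySem.Chars.lowerChar c) = PySem.Chars.isalpha c := by
  by_cases h : PySem.Chars.isupper c
  · have ht := lowerChar_toNat c h
    have hr : 65 ≤ c.toNat ∧ c.toNat ≤ 90 := by
      simp only [PySem.Chars.isupper, Bool.and_eq_true, decide_eq_true_eq] at h
      exact ⟨Nat.succ_le_of_lt h.1, h.2⟩
    have hlo : PySem.Chars.islower (PySem.Chars.lowerChar c) = true := by
      simp only [PySem.Chars.islower, Bool.and_eq_true, decide_eq_true_eq]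
      constructor
      · show 'a'.toNat ≤ (PySem.Chars.lowerChar c).toNat
        have : 'a'.toNat = 97 := rfl
        omega
      · show (PySem.Chars.lowerChar c).toNat ≤ 'z'.toNat
        have : 'z'.toNat = 122 := rfl
        omega
    simp [PySem.Chars.isalpha, hlo, h]
  · simp only [PySem.Chars.lowerChar, h, if_false, Bool.false_eq_true]

-- A's loop, characterised: it succeeds iff every char is alphabetic, returning cap + (#uppercase).
theorem pvALoop_eq (cs : List Char) (cap : Int) :
    pvALoop cs cap =
      if cs.all PySem.Chars.isalpha then some (cap + (cs.countP PySem.Chars.isupper : Int)) else none := by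
  induction cs generalizing cap with
  | nil => simp [pvALoop]
  | cons c rest ih =>
    simp only [pvALoop, List.all_cons, List.countP_cons]
    by_cases ha : PySem.Chars.isalpha c
    · rw [ih]
      by_cases hr : rest.all PySem.Chars.isalpha
      · simp [ha, hr]
        by_cases hu : PySem.Chars.isupper c <;> simp [hu] <;> push_cast <;> ring
      · simp [ha, hr]
    · simp [ha]

-- The word equals its lowercased copy iff it has no uppercase character.
theorem lower_eq_self_iff (cs : List Char) : cs = PySem.Chars.lower cs ↔ cs.countP PySem.Chars.isupper = 0 := by
  rw [List.countP_eq_zero]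
  induction cs with
  | nil => simp [PySem.Chars.lower]
  | cons c rest ih =>
    simp only [PySem.Chars.lower, List.map_cons, List.cons.injEq, List.mem_cons] at *
    rw [eq_comm (a := c), lowerChar_eq_self_iff]
    constructor
    · rintro ⟨h1, h2⟩ x hx
      rcases hx with rfl | hx
      · simp [h1]
      · exact ih.mp h2 x hx
    · intro h
      refine ⟨?_, ih.mpr (fun x hx => h x (Or.inr hx))⟩
      have := h c (Or.inl rfl)
      simpa using this

-- Lowering preserves alphabeticness of the whole word.
theorem all_isalpha_lower (cs : List Char) :
    (PySem.Chars.lower cs).all PySem.Chars.isalpha = cs.all PySem.Chars.isalpha := by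
  simp [PySem.Chars.lower, List.all_map, Function.comp_def, isalpha_lowerChar]

-- A on a non-empty word, in closed form.
theorem a_eq (word : String) (allow_one_word : Bool) (c0 : Char) (rest : List Char)
    (hcs : word.toList = c0 :: rest) :
    is_lower_camel_case word allow_one_word =
      if PySem.Chars.isupper c0 then 0
      else if (c0 :: rest).all PySem.Chars.isalpha then
        (if (c0 :: rest).countP PySem.Chars.isupper = 0 ∧ allow_one_word = false then 0 else 1)
      else 0 := by
  unfold is_lower_camel_case
  simp only [hcs, PySem.List.pyGet?_zero_cons, pvALoop_eq]
  by_cases hup : PySem.Chars.isupper c0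
  · simp [hup]
  · by_cases hall : (c0 :: rest).all PySem.Chars.isalpha
    · simp only [hup, hall, if_true, if_false, Bool.false_eq_true, ite_false, ite_true]
      by_cases h0 : (c0 :: rest).countP PySem.Chars.isupper = 0
      · have : (0 : Int) + ((c0 :: rest).countP PySem.Chars.isupper : Int) = 0 := by omega
        simp [h0, this]
      · have : ¬ ((0 : Int) + ((c0 :: rest).countP PySem.Chars.isupper : Int) = 0) := by
          intro h; apply h0; omega
        simp [h0, this]
    · simp [hup, hall]

-- B on a non-empty word reduces to the same closed form.
theorem b_eq (word : String) (allow_one_word : Bool) (c0 : Char) (rest : List Char)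
    (hcs : word.toList = c0 :: rest) :
    is_lower_camel_case_alt word allow_one_word =
      if PySem.Chars.isupper c0 then 0
      else if (c0 :: rest).all PySem.Chars.isalpha then
        (if (c0 :: rest).countP PySem.Chars.isupper = 0 ∧ allow_one_word = false then 0 else 1)
      else 0 := by
  unfold is_lower_camel_case_alt
  have hsl : ∀ (xs : List Char), PySem.List.slice xs none (some 1) = xs.take 1 := by
    intro xs; simp [pysem]
  have hall' : PySem.Chars.strIsalpha (PySem.Chars.lower (c0 :: rest))
      = (c0 :: rest).all PySem.Chars.isalpha := by
    rw [show PySem.Chars.strIsalpha (PySem.Chars.lower (c0 :: rest))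
          = (!(PySem.Chars.lower (c0 :: rest)).isEmpty && (PySem.Chars.lower (c0 :: rest)).all PySem.Chars.isalpha) from rfl,
        all_isalpha_lower]
    simp [PySem.Chars.lower]
  simp only [hcs, hsl, hall']
  have htake : (PySem.Chars.lower (c0 :: rest)).take 1 = [PySem.Chars.lowerChar c0] := by
    simp [PySem.Chars.lower]
  rw [htake, show (c0 :: rest).take 1 = [c0] by simp]
  by_cases hall : (c0 :: rest).all PySem.Chars.isalpha
  · simp only [hall, Bool.not_true, if_false, Bool.false_eq_true, ite_false, if_true, ite_true]
    by_cases hup : PySem.Chars.isupper c0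
    · have hne : PySem.Chars.lowerChar c0 ≠ c0 := by
        rw [Ne, lowerChar_eq_self_iff, hup]; simp
      have hlist : ([c0] : List Char) ≠ [PySem.Chars.lowerChar c0] := by
        simp only [ne_eq, List.cons.injEq, and_true]
        exact fun h => hne h.symm
      simp [hup, hlist]
    · have heq : PySem.Chars.lowerChar c0 = c0 := (lowerChar_eq_self_iff c0).mpr (by simpa using hup)
      have hZ := lower_eq_self_iff (c0 :: rest)
      simp only [heq, ne_eq, not_true_eq_false, if_false, Bool.false_eq_true, ite_false, hup]
      by_cases h0 : (c0 :: rest).countP PySem.Chars.isupper = 0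
      · have hc : c0 :: rest = PySem.Chars.lower (c0 :: rest) := hZ.mpr h0
        by_cases hw : allow_one_word = false
        · rw [if_pos ⟨hc, hw⟩, if_pos ⟨h0, hw⟩]
        · rw [if_neg (fun h => hw h.2), if_neg (fun h => hw h.2)]
      · have hc : ¬ (c0 :: rest = PySem.Chars.lower (c0 :: rest)) := fun h => h0 (hZ.mp h)
        rw [if_neg (fun h => hc h.1), if_neg (fun h => h0 h.1)]
  · by_cases hup : PySem.Chars.isupper c0 <;> simp [hall, hup]

-- ===== VERDICT (by name: the statement is the Claim_ definition above) =====
theorem is_lower_camel_case_spec : Claim_equal_is_lower_camel_case := by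
  intro word allow_one_word _ hpre
  unfold Spec_is_lower_camel_case
  obtain ⟨c0, rest, hcs⟩ : ∃ c rest, word.toList = c :: rest := by
    cases h : word.toList with
    | nil => exact absurd (by rw [← String.ofList_toList (s := word), h]) hpre
    | cons c rest => exact ⟨c, rest, rfl⟩
  rw [a_eq word allow_one_word c0 rest hcs, b_eq word allow_one_word c0 rest hcs]
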